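-- pv_equiv track=rewrite | github.com/MeanderingProgrammer/advent-of-code | 2017/09/solver.py | remove_special
-- ===== SOURCE A (Python) =====
-- def remove_special(group):
--     result, index = [], 0
--     while index < len(group):
--         char = group[index]
--         if char == '!':
--             index += 2
--         else:
--             result.append(char)
--             index += 1
--     return ''.join(result)
-- ===== SOURCE B (Python) =====
-- def remove_special(group):
--     result, skip = [], False
--     for char in group:
--         if skip:
--             skip = False
--         elif char == '!':
--             skip = True
--         else:
--             result.append(char)
--     return ''.join(result)
-- ===== Notes on version B (the rewrite author's own statement) =====
-- stated objective: simpler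
-- what changed: Replaces the index-cursor while loop (jumping the index by 2 on '!') with a single for-each pass carrying a skip-next boolean state, so no indexing or length arithmetic is needed.
import Mathlib
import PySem

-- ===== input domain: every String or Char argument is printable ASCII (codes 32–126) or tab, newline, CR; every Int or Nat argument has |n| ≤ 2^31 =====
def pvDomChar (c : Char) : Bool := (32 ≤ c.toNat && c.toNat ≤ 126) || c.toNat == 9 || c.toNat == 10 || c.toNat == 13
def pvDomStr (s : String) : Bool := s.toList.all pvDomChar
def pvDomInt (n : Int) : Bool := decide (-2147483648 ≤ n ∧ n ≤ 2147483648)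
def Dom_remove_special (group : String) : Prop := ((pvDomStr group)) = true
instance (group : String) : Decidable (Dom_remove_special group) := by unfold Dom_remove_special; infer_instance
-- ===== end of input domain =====

-- B replaces A's index-jumping cursor loop with a single for-each pass carrying a
-- skip-next boolean; objective: simpler (no indexing/length arithmetic).

-- ===== PORT A =====
-- the while loop: cursor 'index' over the characters, '!' jumps the index by 2
def remove_special_go (cs : List Char) (result : List Char) (index : Nat) : List Char :=
  if h : index < cs.length then
    let char := cs[index]
    if char = '!' then
      remove_special_go cs result (index + 2)
    else
      remove_special_go cs (result ++ [char]) (index + 1)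
  else
    result
termination_by cs.length - index

def remove_special (group : String) : String :=
  String.ofList (remove_special_go group.toList [] 0)

-- ===== PORT B =====
-- one pass with (result, skip) state, exactly Source B's for loop
def remove_special_alt_step (st : List Char × Bool) (char : Char) : List Char × Bool :=
  if st.2 then (st.1, false)
  else if char = '!' then (st.1, true)
  else (st.1 ++ [char], false)

def remove_special_alt (group : String) : String :=
  String.ofList (group.toList.foldl remove_special_alt_step ([], false)).1

-- ===== PRECONDITION & SPEC =====
def Spec_remove_special (group : String) (out : String) : Prop := out = remove_special_alt group
instance (group : String) (out : String) : Decidable (Spec_remove_special group out) := by unfold Spec_remove_special; infer_instance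

-- ===== CLAIM (what is proved, stated in full; the proofs are below) =====
def Claim_equal_remove_special : Prop := ∀ (group : String), Dom_remove_special group → Spec_remove_special group (remove_special group)

-- ===== LEMMAS AND PROOFS =====

theorem step_false_bang (r : List Char) :
    remove_special_alt_step (r, false) '!' = (r, true) := by
  simp [remove_special_alt_step]

theorem step_false_other (r : List Char) (c : Char) (hc : c ≠ '!') :
    remove_special_alt_step (r, false) c = (r ++ [c], false) := by
  simp [remove_special_alt_step, hc]

theorem alt_skip_cons (r : List Char) (c : Char) (l : List Char) :
    List.foldl remove_special_alt_step (r, true) (c :: l)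
      = List.foldl remove_special_alt_step (r, false) l := by
  simp [List.foldl, remove_special_alt_step]

theorem go_eq_fold (n : Nat) : ∀ (cs : List Char) (index : Nat) (result : List Char),
    cs.length - index ≤ n →
    remove_special_go cs result index
      = (List.foldl remove_special_alt_step (result, false) (cs.drop index)).1 := by
  induction n with
  | zero =>
    intro cs index result hle
    have h : ¬ index < cs.length := by omega
    rw [remove_special_go]
    simp [h, List.drop_eq_nil_of_le (by omega : cs.length ≤ index)]
  | succ n ih =>
    intro cs index result hle
    by_cases h : index < cs.length
    · have hdrop : cs.drop index = cs[index] :: cs.drop (index + 1) :=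
        List.drop_eq_getElem_cons h
      rw [remove_special_go]
      simp only [h, dif_pos]
      by_cases hc : cs[index] = '!'
      · rw [if_pos hc, hdrop, hc]
        rw [List.foldl_cons, step_false_bang]
        by_cases h2 : index + 1 < cs.length
        · have hdrop2 : cs.drop (index + 1) = cs[index + 1] :: cs.drop (index + 2) :=
            List.drop_eq_getElem_cons h2
          rw [hdrop2, alt_skip_cons]
          exact ih cs (index + 2) result (by omega)
        · have hnil : cs.drop (index + 1) = [] :=
            List.drop_eq_nil_of_le (by omega)
          rw [hnil]
          rw [remove_special_go]
          simp [show ¬ index + 2 < cs.length by omega, List.foldl]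
      · rw [if_neg hc, hdrop]
        rw [List.foldl_cons, step_false_other result cs[index] hc]
        exact ih cs (index + 1) (result ++ [cs[index]]) (by omega)
    · rw [remove_special_go]
      simp [h, List.drop_eq_nil_of_le (by omega : cs.length ≤ index)]

-- ===== VERDICT (by name: the statement is the Claim_ definition above) =====
theorem remove_special_spec : Claim_equal_remove_special := by
  intro group _
  unfold Spec_remove_special remove_special remove_special_alt
  rw [go_eq_fold (group.toList.length) group.toList 0 [] (by omega)]
  simp
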